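-- pv_equiv track=rewrite | github.com/ddasturbek/UzbekLemma | UzLemma.py | find_suffix
-- ===== SOURCE A (Python) =====
-- def find_suffix(suffixes):
--     # Find suffixes from word
--     # son = ['ta', 'tadan', 'tacha', 'ov', 'ovi', 'ovlab', 'ovlashib', 'ovlon', 'ala', 'larcha', 'lar', 'lab', 'nchi', 'inchi']
--     # ravish = ['roq']
--     # sifat = ['roq', 'ish', "g'ish", 'mtir', 'imtir', 'gina']
--     # olmosh_ot = ['ni', 'n', 'i', 'ning', 'ka', 'ga', 'qa', 'da', 'dan']
--
--     pos_suffixes = [['ta', 'tadan', 'tacha', 'ov', 'ovi', 'ovlab', 'ovlashib', 'ovlon', 'ala', 'larcha', 'lar', 'lab', 'nchi', 'inchi'],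
--                     ['roq'],
--                     ['roq', 'ish', "g'ish", 'mtir', 'imtir', 'gina'],
--                     ['ni', 'n', 'i', 'ning', 'ka', 'ga', 'qa', 'da', 'dan'],
--                     ['dir'],
--                     ['mi']]
--     k = 0
--     for p_s in pos_suffixes:
--         for suffix in p_s:
--             if len(suffixes) >= len(suffix):
--                 tf = True
--                 for i in range(len(suffix)):
--                     if suffix[i] != suffixes[i]:
--                         tf = False
--                 if tf:
--                     suffixes = suffixes[len(suffix):]
--                     k += 1
--
--     if k == 0:
--         return False
--     else:
--         return True
-- ===== SOURCE B (Python) =====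
-- ALL_SUFFIXES = ['ta', 'tadan', 'tacha', 'ov', 'ovi', 'ovlab', 'ovlashib', 'ovlon',
--                 'ala', 'larcha', 'lar', 'lab', 'nchi', 'inchi',
--                 'roq',
--                 'roq', 'ish', "g'ish", 'mtir', 'imtir', 'gina',
--                 'ni', 'n', 'i', 'ning', 'ka', 'ga', 'qa', 'da', 'dan',
--                 'dir',
--                 'mi']
--
-- def find_suffix(suffixes):
--     return any(suffixes.startswith(s) for s in ALL_SUFFIXES)
-- ===== Notes on version B (the rewrite author's own statement) =====
-- stated objective: simpler
-- what changed: Replaces A's mutating triple loop (char-by-char comparison, prefix stripping, match counter over six suffix groups) with a single any/startswith pass over the flattened suffix list, exploiting that the boolean result only depends on whether some suffix is a prefix of the original string.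
import Mathlib
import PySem

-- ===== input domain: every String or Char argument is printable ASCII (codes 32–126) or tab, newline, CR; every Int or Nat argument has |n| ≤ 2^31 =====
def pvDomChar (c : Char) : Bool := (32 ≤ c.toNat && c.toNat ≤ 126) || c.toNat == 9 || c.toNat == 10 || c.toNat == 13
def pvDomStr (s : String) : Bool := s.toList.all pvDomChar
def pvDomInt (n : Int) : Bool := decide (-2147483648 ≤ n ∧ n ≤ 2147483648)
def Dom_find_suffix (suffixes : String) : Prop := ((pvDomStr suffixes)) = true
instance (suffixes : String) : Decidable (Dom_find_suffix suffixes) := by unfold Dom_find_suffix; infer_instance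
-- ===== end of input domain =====

-- B replaces A's mutating triple loop (char-by-char compare, strip-on-match, counter) by a single
-- `any`/startswith pass over the flattened suffix list — simpler, same boolean result.

-- ===== PORT A =====
-- one iteration of A's inner 'for suffix in p_s' body, on state (suffixes, k);
-- the char loop compares suffix[i] with suffixes[i] via pyGet? (both indices are in range, so
-- comparing the Options is exactly Python's char comparison)
def pvStepA (st : List Char × Int) (suf : List Char) : List Char × Int :=
  if suf.length ≤ st.1.length then
    let tf := (PySem.List.pyRange 0 (suf.length : Int) 1).foldl
      (fun tf i => if PySem.Chars.pyGet? suf i ≠ PySem.Chars.pyGet? st.1 i then false else tf) true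
    if tf then (PySem.Chars.slice st.1 (some (suf.length : Int)) none, st.2 + 1) else st
  else st

def pvPosSuffixes : List (List (List Char)) :=
  [["ta".toList, "tadan".toList, "tacha".toList, "ov".toList, "ovi".toList, "ovlab".toList,
    "ovlashib".toList, "ovlon".toList, "ala".toList, "larcha".toList, "lar".toList, "lab".toList,
    "nchi".toList, "inchi".toList],
   ["roq".toList],
   ["roq".toList, "ish".toList, "g'ish".toList, "mtir".toList, "imtir".toList, "gina".toList],
   ["ni".toList, "n".toList, "i".toList, "ning".toList, "ka".toList, "ga".toList, "qa".toList,
    "da".toList, "dan".toList],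
   ["dir".toList],
   ["mi".toList]]

def find_suffix (suffixes : String) : Bool :=
  let st := pvPosSuffixes.foldl (fun st p_s => p_s.foldl pvStepA st) (suffixes.toList, (0 : Int))
  if st.2 = 0 then false else true

-- ===== PORT B =====
def pvAllSuffixes : List String :=
  ["ta", "tadan", "tacha", "ov", "ovi", "ovlab", "ovlashib", "ovlon", "ala", "larcha", "lar",
   "lab", "nchi", "inchi", "roq", "roq", "ish", "g'ish", "mtir", "imtir", "gina", "ni", "n",
   "i", "ning", "ka", "ga", "qa", "da", "dan", "dir", "mi"]

def find_suffix_alt (suffixes : String) : Bool :=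
  pvAllSuffixes.any (fun s => PySem.Str.startswith suffixes s)

-- ===== PRECONDITION & SPEC =====
def Spec_find_suffix (suffixes : String) (out : Bool) : Prop := out = find_suffix_alt suffixes
instance (suffixes : String) (out : Bool) : Decidable (Spec_find_suffix suffixes out) := by unfold Spec_find_suffix; infer_instance

-- ===== CLAIM (what is proved, stated in full; the proofs are below) =====
def Claim_equal_find_suffix : Prop := ∀ (suffixes : String), Dom_find_suffix suffixes → Spec_find_suffix suffixes (find_suffix suffixes)

-- ===== LEMMAS AND PROOFS =====

-- A's 'tf' loop is an AND-accumulator: folding 'if P i then false else tf' computes init && all (!P)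
theorem pv_andFold {α : Type} (P : α → Prop) [DecidablePred P] :
    ∀ (L : List α) (init : Bool),
      L.foldl (fun tf i => if P i then false else tf) init = (init && L.all (fun i => !decide (P i))) := by
  intro L
  induction L with
  | nil => intro init; simp
  | cons a L ih =>
    intro init
    simp only [List.foldl_cons, List.all_cons, ih]
    by_cases h : P a <;> cases init <;> simp [h]

-- the inner char loop (plus the length guard) is exactly 'suf is a prefix of s'
-- the char loop is an AND over the range; with the length guard it is exactly 'suf <+: s'
theorem pv_all_eq_startswith (s suf : List Char) :
    ((PySem.List.pyRange 0 (suf.length : Int) 1).all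
      (fun i => !decide (PySem.Chars.pyGet? suf i ≠ PySem.Chars.pyGet? s i)))
      = PySem.Chars.startswith s suf := by
  rw [Bool.eq_iff_iff]
  simp only [List.all_eq_true, PySem.List.mem_pyRange_one, Bool.not_eq_eq_eq_not, Bool.not_true,
    decide_eq_false_iff_not, not_not, PySem.Chars.startswith_iff, List.prefix_iff_getElem?]
  constructor
  · intro h i hi
    have := h (i : Int) ⟨by positivity, by exact_mod_cast hi⟩
    simp only [PySem.Chars.pyGet?_eq_listPyGet?, PySem.List.pyGet?_natCast] at this
    rw [List.getElem?_eq_getElem hi] at this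
    exact this.symm
  · intro h i ⟨h0, hi⟩
    obtain ⟨n, rfl⟩ := Int.eq_ofNat_of_zero_le h0
    have hn : n < suf.length := by exact_mod_cast hi
    simp only [PySem.Chars.pyGet?_eq_listPyGet?, PySem.List.pyGet?_natCast]
    rw [List.getElem?_eq_getElem hn, (h n hn)]

theorem pvStepA_eq (st : List Char × Int) (suf : List Char) :
    pvStepA st suf =
      if PySem.Chars.startswith st.1 suf then (st.1.drop suf.length, st.2 + 1) else st := by
  obtain ⟨s, k⟩ := st
  simp only [pvStepA]
  by_cases hlen : suf.length ≤ s.length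
  · rw [if_pos hlen, pv_andFold, Bool.true_and, pv_all_eq_startswith s suf]
    have hdrop : PySem.Chars.slice s (some (suf.length : Int)) none = s.drop suf.length := by
      rw [PySem.Chars.slice_eq_listSlice, PySem.List.slice_from_natCast]
    rw [hdrop]
  · rw [if_neg hlen, if_neg]
    intro hsw
    exact hlen (List.IsPrefix.length_le ((PySem.Chars.startswith_iff ..).mp hsw))

theorem pv_k_mono : ∀ (L : List (List Char)) (st : List Char × Int),
    st.2 ≤ (L.foldl pvStepA st).2 := by
  intro L
  induction L with
  | nil => intro st; simp
  | cons suf L ih =>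
    intro st
    refine le_trans ?_ (ih (pvStepA st suf))
    rw [pvStepA_eq]
    split <;> simp

theorem pv_fold_zero_iff : ∀ (L : List (List Char)) (s : List Char),
    ((L.foldl pvStepA (s, 0)).2 = 0) ↔ ∀ suf ∈ L, PySem.Chars.startswith s suf = false := by
  intro L
  induction L with
  | nil => intro s; simp
  | cons suf L ih =>
    intro s
    simp only [List.foldl_cons, pvStepA_eq]
    by_cases h : PySem.Chars.startswith s suf = true
    · simp only [h, if_pos]
      constructor
      · intro hz
        have hm := pv_k_mono L (s.drop suf.length, (0 : Int) + 1)
        simp only [hz] at hm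
        omega
      · intro hall
        exact absurd (hall suf (by simp)) (by simp [h])
    · simp only [Bool.not_eq_true] at h
      simp [h, ih s]

theorem pv_flatten : pvPosSuffixes.flatten = pvAllSuffixes.map String.toList := by decide

-- ===== VERDICT (by name: the statement is the Claim_ definition above) =====
theorem find_suffix_spec : Claim_equal_find_suffix := by
  intro s _
  unfold Spec_find_suffix find_suffix
  rw [← List.foldl_flatten, pv_flatten]
  simp only [find_suffix_alt]
  by_cases h : ∀ suf ∈ pvAllSuffixes.map String.toList, PySem.Chars.startswith s.toList suf = false
  · rw [if_pos ((pv_fold_zero_iff _ _).mpr h)]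
    symm
    rw [List.any_eq_false]
    intro t ht
    have := h t.toList (List.mem_map_of_mem ht)
    simpa [PySem.Str.startswith_eq] using this
  · rw [if_neg (fun hz => h ((pv_fold_zero_iff _ _).mp hz))]
    symm
    rw [List.any_eq_true]
    simp only [not_forall, Bool.not_eq_false, exists_prop] at h
    obtain ⟨suf, hmem, htrue⟩ := h
    obtain ⟨t, ht, rfl⟩ := List.mem_map.mp hmem
    exact ⟨t, ht, by simpa [PySem.Str.startswith_eq] using htrue⟩
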